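-- pv_equiv track=rewrite | github.com/Zo3rb/studies2025 | DSA/Arrays/06 - Challenge: Rearrange Sorted List in Max/solution.py | rearrange_max_min
-- ===== SOURCE A (Python) =====
-- def rearrange_max_min(arr):
--     """
--     Rearranges a sorted list into max/min form:
--     [max, min, 2nd max, 2nd min, ...]
--
--     Args:
--         arr (List[int]): A sorted list of integers.
--
--     Returns:
--         List[int]: Rearranged list in max/min format.
--     """
--     result = []
--     left, right = 0, len(arr) - 1
--
--     while left <= right:
--         if left != right:
--             result.append(arr[right])
--             result.append(arr[left])
--         else:
--             result.append(arr[left])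
--         left += 1
--         right -= 1
--
--     return result
-- ===== SOURCE B (Python) =====
-- def rearrange_max_min(arr):
--     n = len(arr)
--     return [arr[n - 1 - i // 2] if i % 2 == 0 else arr[i // 2] for i in range(n)]
-- ===== Notes on version B (the rewrite author's own statement) =====
-- stated objective: simpler
-- what changed: Replaces the two-pointer while-loop with mutable left/right state by a single list comprehension over range(len(arr)) using the closed-form index map i -> n-1-i//2 (even i) / i//2 (odd i).
import Mathlib
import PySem

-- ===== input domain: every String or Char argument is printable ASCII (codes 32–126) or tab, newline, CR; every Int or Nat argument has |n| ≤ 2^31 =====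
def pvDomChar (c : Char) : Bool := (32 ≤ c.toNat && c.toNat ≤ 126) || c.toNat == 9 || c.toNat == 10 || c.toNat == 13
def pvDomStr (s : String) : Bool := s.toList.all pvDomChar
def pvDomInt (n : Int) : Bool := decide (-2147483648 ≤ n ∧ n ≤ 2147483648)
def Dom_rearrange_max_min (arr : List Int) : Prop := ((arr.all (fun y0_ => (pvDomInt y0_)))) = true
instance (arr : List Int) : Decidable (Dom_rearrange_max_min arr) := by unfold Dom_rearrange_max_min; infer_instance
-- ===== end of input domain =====

-- B replaces A's two-pointer loop by a closed-form index-map comprehension; objective: simpler.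


-- ===== PORT A =====
-- A's while-loop: left/right pointers, accumulator 'result'.  Indices are always
-- in range while the loop runs (0 ≤ left ≤ right < len), so pyGetD is exact here.
def rearrangeLoopA (arr : List Int) (l r : Int) (acc : List Int) : List Int :=
  if _h : l ≤ r then
    rearrangeLoopA arr (l + 1) (r - 1)
      (if l ≠ r then acc ++ [PySem.List.pyGetD arr r 0, PySem.List.pyGetD arr l 0]
       else acc ++ [PySem.List.pyGetD arr l 0])
  else acc
termination_by (r - l + 1).toNat
decreasing_by omega

def rearrange_max_min (arr : List Int) : List Int :=
  rearrangeLoopA arr 0 ((arr.length : Int) - 1) []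

-- ===== PORT B =====
-- B's comprehension: [arr[n-1-i//2] if i % 2 == 0 else arr[i//2] for i in range(n)].
def rearrange_max_min_alt (arr : List Int) : List Int :=
  let n : Int := arr.length
  (PySem.List.pyRange 0 n 1).map (fun i =>
    if PySem.Int.mod i 2 = 0 then PySem.List.pyGetD arr (n - 1 - PySem.Int.floordiv i 2) 0
    else PySem.List.pyGetD arr (PySem.Int.floordiv i 2) 0)

-- ===== PRECONDITION & SPEC =====
def Spec_rearrange_max_min (arr : List Int) (out : List Int) : Prop := out = rearrange_max_min_alt arr
instance (arr : List Int) (out : List Int) : Decidable (Spec_rearrange_max_min arr out) := by unfold Spec_rearrange_max_min; infer_instance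

-- ===== CLAIM (what is proved, stated in full; the proofs are below) =====
def Claim_equal_rearrange_max_min : Prop := ∀ (arr : List Int), Dom_rearrange_max_min arr → Spec_rearrange_max_min arr (rearrange_max_min arr)

-- ===== LEMMAS AND PROOFS =====

-- B's element function, abbreviated for the proofs.
def bFun (arr : List Int) (i : Int) : Int :=
  if PySem.Int.mod i 2 = 0 then PySem.List.pyGetD arr ((arr.length : Int) - 1 - PySem.Int.floordiv i 2) 0
  else PySem.List.pyGetD arr (PySem.Int.floordiv i 2) 0

theorem bFun_even (arr : List Int) (l : Int) :
    bFun arr (2 * l) = PySem.List.pyGetD arr ((arr.length : Int) - 1 - l) 0 := by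
  unfold bFun
  rw [show PySem.Int.mod (2 * l) 2 = 0 by
        rw [PySem.Int.mod_eq_emod_of_pos (by omega : (0:Int) < 2)]; omega,
      show PySem.Int.floordiv (2 * l) 2 = l by
        rw [PySem.Int.floordiv_eq_ediv_of_pos (by omega : (0:Int) < 2)]; omega]
  simp

theorem bFun_odd (arr : List Int) (l : Int) :
    bFun arr (2 * l + 1) = PySem.List.pyGetD arr l 0 := by
  unfold bFun
  rw [show PySem.Int.mod (2 * l + 1) 2 = 1 by
        rw [PySem.Int.mod_eq_emod_of_pos (by omega : (0:Int) < 2)]; omega,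
      show PySem.Int.floordiv (2 * l + 1) 2 = l by
        rw [PySem.Int.floordiv_eq_ediv_of_pos (by omega : (0:Int) < 2)]; omega]
  simp

-- Unrolling two steps of B's index range [2l, n) when 2l+1 < n.
theorem map_range_two_step (arr : List Int) (l : Int) (h : 2 * l + 1 < (arr.length : Int)) :
    (PySem.List.pyRange (2 * l) (arr.length : Int) 1).map (bFun arr)
      = PySem.List.pyGetD arr ((arr.length : Int) - 1 - l) 0
        :: PySem.List.pyGetD arr l 0
        :: (PySem.List.pyRange (2 * (l + 1)) (arr.length : Int) 1).map (bFun arr) := by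
  rw [PySem.List.pyRange_one_cons (by omega)]
  rw [PySem.List.pyRange_one_cons (by omega : 2 * l + 1 < (arr.length : Int))]
  have h2 : 2 * l + 1 + 1 = 2 * (l + 1) := by ring
  rw [h2]
  simp [bFun_even, bFun_odd]

-- Loop invariant: with r = n - 1 - l, the remaining loop appends exactly
-- B's values for the index range [2l, n).
theorem loopA_eq_map (arr : List Int) :
    ∀ (fuel : Nat) (l : Int) (acc : List Int), 0 ≤ l →
      (((arr.length : Int) - 1 - l) - l + 1).toNat ≤ fuel →
      rearrangeLoopA arr l ((arr.length : Int) - 1 - l) acc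
        = acc ++ (PySem.List.pyRange (2 * l) (arr.length : Int) 1).map (bFun arr) := by
  intro fuel
  induction fuel with
  | zero =>
    intro l acc hl hf
    rw [rearrangeLoopA, dif_neg (by omega),
        PySem.List.pyRange_one_eq_nil (by omega)]
    simp
  | succ k ih =>
    intro l acc hl hf
    by_cases hle : l ≤ (arr.length : Int) - 1 - l
    · rw [rearrangeLoopA, dif_pos hle]
      by_cases hne : l = (arr.length : Int) - 1 - l
      · -- middle element: next call terminates immediately
        rw [if_neg (by omega), rearrangeLoopA, dif_neg (by omega)]
        rw [PySem.List.pyRange_one_cons (by omega),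
            PySem.List.pyRange_one_eq_nil (by omega)]
        have hb : bFun arr (2 * l) = PySem.List.pyGetD arr l 0 := by
          rw [bFun_even]; congr 1; omega
        simp [hb]
      · rw [if_pos hne]
        have harg : (arr.length : Int) - 1 - l - 1 = (arr.length : Int) - 1 - (l + 1) := by ring
        rw [harg, ih (l + 1)
              (acc ++ [PySem.List.pyGetD arr ((arr.length : Int) - 1 - l) 0,
                       PySem.List.pyGetD arr l 0]) (by omega) (by omega)]
        rw [map_range_two_step arr l (by omega)]
        simp
    · rw [rearrangeLoopA, dif_neg hle, PySem.List.pyRange_one_eq_nil (by omega)]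
      simp

-- ===== VERDICT (by name: the statement is the Claim_ definition above) =====
theorem rearrange_max_min_spec : Claim_equal_rearrange_max_min := by
  intro arr _
  show rearrange_max_min arr = rearrange_max_min_alt arr
  rw [rearrange_max_min,
      show (arr.length : Int) - 1 = (arr.length : Int) - 1 - 0 by ring,
      loopA_eq_map arr ((((arr.length : Int) - 1 - 0) - 0 + 1).toNat) 0 [] (by omega) le_rfl,
      show (2 : Int) * 0 = 0 by ring]
  rw [show rearrange_max_min_alt arr
        = (PySem.List.pyRange 0 (arr.length : Int) 1).map (bFun arr) from rfl]
  simp
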